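-- pv_equiv track=rewrite | github.com/facebookresearch/habitat-sim | examples/obj_semantics_writer.py | assign_indices_to_classes
-- ===== SOURCE A (Python) =====
-- from typing import Callable, Dict, List, Union
--
-- UNKNOWN_INDEX = 0
--
-- def assign_indices_to_classes(
--     obj_classes_to_handles: Dict[str, List[str]]
-- ) -> Dict[str, int]:
--     """
--     Processes the provided object classes and assigns indices to each.
--     NOTE: 'unknown' is a special case. All classes with 'unknown' in the string are condensed to index 0.
--     NOTE: 'N_A' is condensed to 'unknown' at index 0.
--     """
--     next_index = UNKNOWN_INDEX + 1
--     classes_to_indices = {}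
--     classes_sorted = sorted(obj_classes_to_handles.keys())
--     for obj_class in classes_sorted:
--         if "unknown" in obj_class or obj_class == "N_A":
--             classes_to_indices[obj_class] = UNKNOWN_INDEX
--         else:
--             classes_to_indices[obj_class] = next_index
--             next_index += 1
--     return classes_to_indices
-- ===== SOURCE B (Python) =====
-- def assign_indices_to_classes(obj_classes_to_handles):
--     """
--     Processes the provided object classes and assigns indices to each.
--     NOTE: 'unknown' is a special case. All classes with 'unknown' in the string are condensed to index 0.
--     NOTE: 'N_A' is condensed to 'unknown' at index 0.
--     """
--     classes_sorted = sorted(obj_classes_to_handles.keys())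
--     regular = [c for c in classes_sorted if "unknown" not in c and c != "N_A"]
--     index_table = {c: i for i, c in enumerate(regular, start=1)}
--     return {c: index_table.get(c, 0) for c in classes_sorted}
-- ===== Notes on version B (the rewrite author's own statement) =====
-- stated objective: alternative
-- what changed: Replaces the counter-threaded accumulator loop by a pre-built index table (enumerate over the filtered sorted class list, start=1) plus a final lookup pass with default 0 for the special classes.
import Mathlib
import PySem

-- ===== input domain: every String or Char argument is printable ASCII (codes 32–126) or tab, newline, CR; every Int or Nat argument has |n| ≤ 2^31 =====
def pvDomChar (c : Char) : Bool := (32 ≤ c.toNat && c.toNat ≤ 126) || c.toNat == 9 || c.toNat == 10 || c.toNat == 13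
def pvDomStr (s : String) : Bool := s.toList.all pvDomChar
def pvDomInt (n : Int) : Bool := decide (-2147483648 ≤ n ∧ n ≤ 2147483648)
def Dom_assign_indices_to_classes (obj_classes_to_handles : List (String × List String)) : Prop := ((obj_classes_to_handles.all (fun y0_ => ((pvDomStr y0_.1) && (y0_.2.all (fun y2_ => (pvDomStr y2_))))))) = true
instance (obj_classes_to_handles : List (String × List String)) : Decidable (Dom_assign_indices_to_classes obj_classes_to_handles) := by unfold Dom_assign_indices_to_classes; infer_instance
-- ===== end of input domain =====

-- B replaces A's counter-threaded dict-building loop by a pre-built index table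
-- (enumerate over the filtered sorted class list, start 1) plus a final lookup pass
-- with default 0; alternative decomposition, same cost.


-- ===== PORT A =====
-- Port of A: sort the dict's keys, then one loop threading (classes_to_indices, next_index).
def assign_indices_to_classes (obj_classes_to_handles : List (String × List String)) : List (String × Int) :=
  let classes_sorted := PySem.List.sorted (PySem.Dict.keys (PySem.Dict.ofList obj_classes_to_handles)) (fun x => x) false
  let res := classes_sorted.foldl
    (fun (st : PySem.Dict String Int × Int) obj_class =>
      if PySem.Str.isIn "unknown" obj_class || obj_class == "N_A" then
        (st.1.insert obj_class 0, st.2)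
      else
        (st.1.insert obj_class st.2, st.2 + 1))
    (PySem.Dict.empty, 1)
  res.1.items

-- ===== PORT B =====
-- Port of B: filter the sorted keys, enumerate from 1 into an index table, then map lookups.
def assign_indices_to_classes_alt (obj_classes_to_handles : List (String × List String)) : List (String × Int) :=
  let classes_sorted := PySem.List.sorted (PySem.Dict.keys (PySem.Dict.ofList obj_classes_to_handles)) (fun x => x) false
  let regular := classes_sorted.filter (fun c => !(PySem.Str.isIn "unknown" c) && !(c == "N_A"))
  let index_table : PySem.Dict String Int :=
    PySem.Dict.ofList ((PySem.List.enumerate regular 1).map (fun p => (p.2, p.1)))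
  classes_sorted.map (fun c => (c, index_table.getD c 0))

-- ===== PRECONDITION & SPEC =====
def Spec_assign_indices_to_classes (obj_classes_to_handles : List (String × List String)) (out : List (String × Int)) : Prop := out = assign_indices_to_classes_alt obj_classes_to_handles
instance (obj_classes_to_handles : List (String × List String)) (out : List (String × Int)) : Decidable (Spec_assign_indices_to_classes obj_classes_to_handles out) := by unfold Spec_assign_indices_to_classes; infer_instance

-- ===== CLAIM (what is proved, stated in full; the proofs are below) =====
def Claim_equal_assign_indices_to_classes : Prop := ∀ (obj_classes_to_handles : List (String × List String)), Dom_assign_indices_to_classes obj_classes_to_handles → Spec_assign_indices_to_classes obj_classes_to_handles (assign_indices_to_classes obj_classes_to_handles)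

-- ===== LEMMAS AND PROOFS =====

-- the special-class test shared by both programs
def pvSpecial (c : String) : Bool := PySem.Str.isIn "unknown" c || c == "N_A"

-- common specification of the assignment on a list of (distinct) class names, starting at counter n
def pvGo (n : Int) : List String → List (String × Int)
  | [] => []
  | c :: cs => if pvSpecial c then (c, 0) :: pvGo n cs else (c, n) :: pvGo (n + 1) cs

-- the table B builds from a class list, starting enumeration at n
def pvTbl (cs : List String) (n : Int) : PySem.Dict String Int :=
  PySem.Dict.ofList ((PySem.List.enumerate (cs.filter (fun c => !(PySem.Str.isIn "unknown" c) && !(c == "N_A"))) n).map (fun p => (p.2, p.1)))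

theorem pvTbl_items (cs : List String) (n : Int)
    (h : (cs.filter (fun c => !(PySem.Str.isIn "unknown" c) && !(c == "N_A"))).Nodup) :
    (pvTbl cs n).items
      = (PySem.List.enumerate (cs.filter (fun c => !(PySem.Str.isIn "unknown" c) && !(c == "N_A"))) n).map (fun p => (p.2, p.1)) := by
  have := PySem.Dict.items_foldl_insert_fresh
    (l := (PySem.List.enumerate (cs.filter (fun c => !(PySem.Str.isIn "unknown" c) && !(c == "N_A"))) n).map (fun p => (p.2, p.1)))
    (k := Prod.fst) (v := Prod.snd) (d := PySem.Dict.empty)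
    (by intro a _; simp [PySem.Dict.contains_empty])
    (by
      have hm : ((PySem.List.enumerate (cs.filter (fun c => !(PySem.Str.isIn "unknown" c) && !(c == "N_A"))) n).map (fun p => (p.2, p.1))).map Prod.fst
          = cs.filter (fun c => !(PySem.Str.isIn "unknown" c) && !(c == "N_A")) := by
        rw [List.map_map]
        exact PySem.List.map_snd_enumerate _ _
      rw [hm]; exact h)
  simpa [pvTbl, PySem.Dict.ofList] using this

theorem pvTbl_keys (cs : List String) (n : Int)
    (h : (cs.filter (fun c => !(PySem.Str.isIn "unknown" c) && !(c == "N_A"))).Nodup) :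
    (pvTbl cs n).keys = cs.filter (fun c => !(PySem.Str.isIn "unknown" c) && !(c == "N_A")) := by
  show (pvTbl cs n).items.map Prod.fst = _
  rw [pvTbl_items cs n h, List.map_map]
  exact PySem.List.map_snd_enumerate _ _

-- B's lookup pass realises pvGo on a duplicate-free class list
theorem pvB_go (cs : List String) (n : Int) (hnd : cs.Nodup) :
    cs.map (fun c => (c, (pvTbl cs n).getD c 0)) = pvGo n cs := by
  induction cs generalizing n with
  | nil => rfl
  | cons c cs ih =>
    have hnd' : cs.Nodup := hnd.of_cons
    have hcnot : c ∉ cs := (List.nodup_cons.mp hnd).1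
    have hfnd : ∀ m : Int, (cs.filter (fun x => !(PySem.Str.isIn "unknown" x) && !(x == "N_A"))).Nodup :=
      fun _ => hnd'.filter _
    by_cases hsp : pvSpecial c = true
    · -- special head: it is filtered out, the table is the tail's table
      have hf : (c :: cs).filter (fun x => !(PySem.Str.isIn "unknown" x) && !(x == "N_A"))
          = cs.filter (fun x => !(PySem.Str.isIn "unknown" x) && !(x == "N_A")) := by
        simp only [List.filter_cons]
        have hff : (!(PySem.Str.isIn "unknown" c) && !(c == "N_A")) = false := by
          rcases Bool.or_eq_true_iff.mp hsp with h1 | h1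
          · rw [h1]; rfl
          · rw [h1]; cases PySem.Str.isIn "unknown" c <;> rfl
        rw [hff]; rfl
      have htbl : pvTbl (c :: cs) n = pvTbl cs n := by simp only [pvTbl, hf]
      have hc0 : (pvTbl (c :: cs) n).getD c 0 = 0 := by
        apply PySem.Dict.getD_of_not_contains
        rw [Bool.eq_false_iff]
        intro hcon
        have := (PySem.Dict.contains_iff_mem_keys _ _).mp hcon
        rw [htbl, pvTbl_keys cs n (hfnd n)] at this
        exact hcnot (List.mem_of_mem_filter this)
      have hc0' : (pvTbl cs n).getD c 0 = 0 := htbl ▸ hc0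
      rw [List.map_cons, htbl, hc0', ih n hnd']
      simp only [pvGo, hsp, if_true]
    · -- regular head: the table is (c, n) consed onto the tail's table (started at n+1)
      have hsp2 : PySem.Str.isIn "unknown" c = false ∧ (c == "N_A") = false :=
        Bool.or_eq_false_iff.mp (Bool.eq_false_iff.mpr hsp)
      have hb : (!(PySem.Str.isIn "unknown" c) && !(c == "N_A")) = true := by
        rw [hsp2.1, hsp2.2]; rfl
      have hf : (c :: cs).filter (fun x => !(PySem.Str.isIn "unknown" x) && !(x == "N_A"))
          = c :: cs.filter (fun x => !(PySem.Str.isIn "unknown" x) && !(x == "N_A")) := by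
        rw [List.filter_cons, hb]; rfl
      have hfc : (c :: cs.filter (fun x => !(PySem.Str.isIn "unknown" x) && !(x == "N_A"))).Nodup := by
        refine List.nodup_cons.mpr ⟨fun hm => hcnot (List.mem_of_mem_filter hm), hfnd n⟩
      have hitems : (pvTbl (c :: cs) n).items = (c, n) :: (pvTbl cs (n + 1)).items := by
        rw [pvTbl_items (c :: cs) n (by rw [hf]; exact hfc), hf, PySem.List.enumerate_cons,
          List.map_cons, pvTbl_items cs (n + 1) (hfnd (n + 1))]
      have hkeysnd : (pvTbl (c :: cs) n).keys.Nodup := by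
        rw [pvTbl_keys (c :: cs) n (by rw [hf]; exact hfc), hf]
        exact hfc
      have hcn : (pvTbl (c :: cs) n).getD c 0 = n := by
        apply PySem.Dict.getD_of_mem_items _ _ hkeysnd
        rw [hitems]; exact List.mem_cons_self
      have htail : ∀ x ∈ cs, (pvTbl (c :: cs) n).getD x 0 = (pvTbl cs (n + 1)).getD x 0 := by
        intro x hx
        by_cases hxk : x ∈ (pvTbl cs (n + 1)).keys
        · have hxk' : (pvTbl cs (n + 1)).keys.Nodup := by
            rw [pvTbl_keys cs (n + 1) (hfnd (n + 1))]; exact hfnd (n + 1)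
          obtain ⟨v, hv⟩ : ∃ v, (x, v) ∈ (pvTbl cs (n + 1)).items := by
            have hx' : x ∈ (pvTbl cs (n + 1)).items.map Prod.fst := hxk
            obtain ⟨p, hp, hpe⟩ := List.mem_map.mp hx'
            subst hpe
            exact ⟨p.2, by rw [Prod.mk.eta]; exact hp⟩
          rw [PySem.Dict.getD_of_mem_items _ hv hxk' 0]
          exact PySem.Dict.getD_of_mem_items _ (by rw [hitems]; exact List.mem_cons_of_mem _ hv) hkeysnd 0
        · have hx1 : (pvTbl cs (n + 1)).getD x 0 = 0 := by
            apply PySem.Dict.getD_of_not_contains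
            rw [Bool.eq_false_iff]
            exact fun hcon => hxk ((PySem.Dict.contains_iff_mem_keys _ _).mp hcon)
          have hx2 : (pvTbl (c :: cs) n).getD x 0 = 0 := by
            apply PySem.Dict.getD_of_not_contains
            rw [Bool.eq_false_iff]
            intro hcon
            have hm := (PySem.Dict.contains_iff_mem_keys _ _).mp hcon
            rw [pvTbl_keys (c :: cs) n (by rw [hf]; exact hfc), hf] at hm
            rcases List.mem_cons.mp hm with hm | hm
            · exact hcnot (hm ▸ hx)
            · exact hxk (by rw [pvTbl_keys cs (n + 1) (hfnd (n + 1))]; exact hm)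
          rw [hx1, hx2]
      calc (c :: cs).map (fun x => (x, (pvTbl (c :: cs) n).getD x 0))
          = (c, n) :: cs.map (fun x => (x, (pvTbl cs (n + 1)).getD x 0)) := by
            rw [List.map_cons, hcn]
            congr 1
            exact List.map_congr_left (fun x hx => by rw [htail x hx])
        _ = pvGo n (c :: cs) := by
            rw [ih (n + 1) hnd']
            simp only [pvGo]
            rw [if_neg hsp]

-- A's loop realises pvGo on a duplicate-free class list of keys fresh to the accumulator
theorem pvA_go (cs : List String) (acc : PySem.Dict String Int) (n : Int)
    (hnd : cs.Nodup) (hfresh : ∀ c ∈ cs, acc.contains c = false) :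
    (cs.foldl
      (fun (st : PySem.Dict String Int × Int) obj_class =>
        if PySem.Str.isIn "unknown" obj_class || obj_class == "N_A" then
          (st.1.insert obj_class 0, st.2)
        else
          (st.1.insert obj_class st.2, st.2 + 1))
      (acc, n)).1.items = acc.items ++ pvGo n cs := by
  induction cs generalizing acc n with
  | nil => simp [pvGo]
  | cons c cs ih =>
    have hnd' : cs.Nodup := hnd.of_cons
    have hcnot : c ∉ cs := (List.nodup_cons.mp hnd).1
    have hcfresh : acc.contains c = false := hfresh c List.mem_cons_self
    have hfresh' : ∀ (v : Int), ∀ x ∈ cs, (acc.insert c v).contains x = false := by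
      intro v x hx
      rw [PySem.Dict.contains_insert]
      have hne : (x == c) = false := by
        rw [beq_eq_false_iff_ne]; exact fun he => hcnot (he ▸ hx)
      rw [hne, hfresh x (List.mem_cons_of_mem _ hx), Bool.or_self]
    by_cases hsp : (PySem.Str.isIn "unknown" c || c == "N_A") = true
    · rw [List.foldl_cons, if_pos hsp, ih _ _ hnd' (hfresh' 0),
        PySem.Dict.items_insert_of_not_contains _ _ hcfresh, List.append_assoc]
      simp only [pvGo, pvSpecial, hsp, if_true, List.singleton_append]
    · rw [List.foldl_cons, if_neg hsp, ih _ _ hnd' (hfresh' n),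
        PySem.Dict.items_insert_of_not_contains _ _ hcfresh, List.append_assoc]
      simp only [pvGo, pvSpecial, List.singleton_append]
      rw [if_neg hsp]

-- ===== VERDICT (by name: the statement is the Claim_ definition above) =====
theorem assign_indices_to_classes_spec : Claim_equal_assign_indices_to_classes := by
  intro d _
  show assign_indices_to_classes d = assign_indices_to_classes_alt d
  unfold assign_indices_to_classes assign_indices_to_classes_alt
  have hnd : (PySem.List.sorted (PySem.Dict.keys (PySem.Dict.ofList d)) (fun x => x) false).Nodup :=
    (PySem.List.sorted_perm _ _ _).nodup_iff.mpr (PySem.Dict.nodup_keys_ofList d)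
  rw [pvA_go _ PySem.Dict.empty 1 hnd (by intro c _; exact PySem.Dict.contains_empty c),
    ← pvB_go _ 1 hnd]
  simp [pvTbl]
  rfl
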